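-- pv_equiv track=rewrite | github.com/SlimBroken/PIcsMake | photo_splitter.py | _merge_cut_lists
-- ===== SOURCE A (Python) =====
-- def _merge_cut_lists(cuts_a, cuts_b, proximity=8):
--     """Merge two sorted cut lists, deduplicating cuts within proximity px."""
--     merged = sorted(set(cuts_a) | set(cuts_b))
--     if not merged:
--         return merged
--     deduped = [merged[0]]
--     for c in merged[1:]:
--         if c - deduped[-1] >= proximity:
--             deduped.append(c)
--     return deduped
-- ===== SOURCE B (Python) =====
-- def _merge_cut_lists(cuts_a, cuts_b, proximity=8):
--     """Merge two sorted cut lists, deduplicating cuts within proximity px."""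
--     sa = sorted(set(cuts_a))
--     sb = sorted(set(cuts_b))
--     # linear two-pointer merge of the two sorted distinct lists
--     merged = []
--     i = j = 0
--     while i < len(sa) and j < len(sb):
--         if sa[i] < sb[j]:
--             merged.append(sa[i]); i += 1
--         elif sb[j] < sa[i]:
--             merged.append(sb[j]); j += 1
--         else:
--             merged.append(sa[i]); i += 1; j += 1
--     merged.extend(sa[i:])
--     merged.extend(sb[j:])
--     if not merged:
--         return []
--     out = [merged[0]]
--     last = merged[0]
--     for c in merged[1:]:
--         if c - last >= proximity:
--             out.append(c)
--             last = c
--     return out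
-- ===== Notes on version B (the rewrite author's own statement) =====
-- stated objective: alternative
-- what changed: Replaces the hash-set union followed by one global sort with two per-list dedup-sorts combined by a linear two-pointer merge, and the proximity pass tracks the last kept cut in a variable instead of re-reading out[-1].
import Mathlib
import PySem

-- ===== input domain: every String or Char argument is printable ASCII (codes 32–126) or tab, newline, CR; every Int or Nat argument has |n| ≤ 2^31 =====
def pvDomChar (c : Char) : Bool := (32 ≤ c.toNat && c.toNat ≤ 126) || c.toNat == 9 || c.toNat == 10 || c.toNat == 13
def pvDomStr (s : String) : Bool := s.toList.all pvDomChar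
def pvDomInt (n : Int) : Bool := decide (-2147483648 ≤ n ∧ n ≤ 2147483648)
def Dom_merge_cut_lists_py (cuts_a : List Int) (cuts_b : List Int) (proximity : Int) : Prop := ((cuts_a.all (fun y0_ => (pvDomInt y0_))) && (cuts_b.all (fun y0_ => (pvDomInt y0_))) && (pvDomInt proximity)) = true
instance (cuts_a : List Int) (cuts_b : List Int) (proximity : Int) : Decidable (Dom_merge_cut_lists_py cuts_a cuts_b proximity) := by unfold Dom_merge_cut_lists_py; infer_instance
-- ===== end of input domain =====

-- B replaces A's set-union + global sort with two per-list sorts combined by a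
-- linear two-pointer merge (alternative algorithm; same overall behaviour).

-- ===== PORT A =====
def merge_cut_lists_py (cuts_a : List Int) (cuts_b : List Int) (proximity : Int) : List Int :=
  -- merged = sorted(set(cuts_a) | set(cuts_b))
  let merged := PySem.List.sorted (PySem.Set.union (PySem.Set.ofList cuts_a) cuts_b) (fun x => x) false
  if h : merged = [] then merged
  else
    -- deduped = [merged[0]]; for c in merged[1:]: if c - deduped[-1] >= proximity: deduped.append(c)
    (PySem.List.slice merged (some 1) none).foldl
      (fun deduped c =>
        if proximity ≤ c - PySem.List.pyGetD deduped (-1) 0 then deduped ++ [c] else deduped)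
      [merged.head h]

-- ===== PORT B =====
-- two-pointer while-loop of Source B, as structural recursion on the two sorted lists
def pvMergeUniq : List Int → List Int → List Int
  | [], ys => ys
  | x :: xs, [] => x :: xs
  | x :: xs, y :: ys =>
      if x < y then x :: pvMergeUniq xs (y :: ys)
      else if y < x then y :: pvMergeUniq (x :: xs) ys
      else x :: pvMergeUniq xs ys

def merge_cut_lists_py_alt (cuts_a : List Int) (cuts_b : List Int) (proximity : Int) : List Int :=
  let sa := PySem.List.sorted (PySem.Set.ofList cuts_a) (fun x => x) false
  let sb := PySem.List.sorted (PySem.Set.ofList cuts_b) (fun x => x) false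
  match pvMergeUniq sa sb with
  | [] => []
  | m :: rest =>
      -- out = [merged[0]]; last = merged[0]; for c in merged[1:]: if c - last >= proximity: append, last = c
      (rest.foldl (fun (s : List Int × Int) c =>
          if proximity ≤ c - s.2 then (s.1 ++ [c], c) else s) ([m], m)).1

-- ===== PRECONDITION & SPEC =====
def Spec_merge_cut_lists_py (cuts_a : List Int) (cuts_b : List Int) (proximity : Int) (out : List Int) : Prop := out = merge_cut_lists_py_alt cuts_a cuts_b proximity
instance (cuts_a : List Int) (cuts_b : List Int) (proximity : Int) (out : List Int) : Decidable (Spec_merge_cut_lists_py cuts_a cuts_b proximity out) := by unfold Spec_merge_cut_lists_py; infer_instance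

-- ===== CLAIM (what is proved, stated in full; the proofs are below) =====
def Claim_equal_merge_cut_lists_py : Prop := ∀ (cuts_a : List Int) (cuts_b : List Int) (proximity : Int), Dom_merge_cut_lists_py cuts_a cuts_b proximity → Spec_merge_cut_lists_py cuts_a cuts_b proximity (merge_cut_lists_py cuts_a cuts_b proximity)

-- ===== LEMMAS AND PROOFS =====

theorem mem_pvMergeUniq (xs ys : List Int) (z : Int) :
    z ∈ pvMergeUniq xs ys ↔ z ∈ xs ∨ z ∈ ys := by
  induction xs generalizing ys with
  | nil => simp [pvMergeUniq]
  | cons x xs ih =>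
    induction ys with
    | nil => simp [pvMergeUniq]
    | cons y ys ihy =>
      simp only [pvMergeUniq]
      split_ifs with h1 h2
      · simp [ih, List.mem_cons]; tauto
      · simp [ihy, List.mem_cons]; tauto
      · have hxy : x = y := le_antisymm (not_lt.mp h2) (not_lt.mp h1)
        subst hxy
        simp [ih, List.mem_cons]; tauto

theorem pairwise_pvMergeUniq (xs ys : List Int)
    (hx : xs.Pairwise (· < ·)) (hy : ys.Pairwise (· < ·)) :
    (pvMergeUniq xs ys).Pairwise (· < ·) := by
  induction xs generalizing ys with
  | nil => simpa [pvMergeUniq] using hy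
  | cons x xs ih =>
    induction ys with
    | nil => simpa [pvMergeUniq] using hx
    | cons y ys ihy =>
      rcases List.pairwise_cons.mp hx with ⟨hxlt, hx'⟩
      rcases List.pairwise_cons.mp hy with ⟨hylt, hy'⟩
      simp only [pvMergeUniq]
      split_ifs with h1 h2
      · refine List.pairwise_cons.mpr ⟨?_, ih (y :: ys) hx' hy⟩
        intro z hz
        rcases (mem_pvMergeUniq xs (y :: ys) z).mp hz with h | h
        · exact hxlt z h
        · rcases List.mem_cons.mp h with rfl | h
          · exact h1
          · exact h1.trans (hylt z h)
      · refine List.pairwise_cons.mpr ⟨?_, ihy hy'⟩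
        intro z hz
        rcases (mem_pvMergeUniq (x :: xs) ys z).mp hz with h | h
        · rcases List.mem_cons.mp h with rfl | h
          · exact h2
          · exact h2.trans (hxlt z h)
        · exact hylt z h
      · have hxy : x = y := le_antisymm (not_lt.mp h2) (not_lt.mp h1)
        subst hxy
        refine List.pairwise_cons.mpr ⟨?_, ih ys hx' hy'⟩
        intro z hz
        rcases (mem_pvMergeUniq xs ys z).mp hz with h | h
        · exact hxlt z h
        · exact hylt z h

-- the merged lists of the two ports are the same list
theorem pvMerged_eq (cuts_a cuts_b : List Int) :
    PySem.List.sorted (PySem.Set.union (PySem.Set.ofList cuts_a) cuts_b) (fun x => x) false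
      = pvMergeUniq (PySem.List.sorted (PySem.Set.ofList cuts_a) (fun x => x) false)
                    (PySem.List.sorted (PySem.Set.ofList cuts_b) (fun x => x) false) := by
  set sa := PySem.List.sorted (PySem.Set.ofList cuts_a) (fun x => x) false with hsa
  set sb := PySem.List.sorted (PySem.Set.ofList cuts_b) (fun x => x) false with hsb
  have hpa : sa.Pairwise (· < ·) := PySem.List.sorted_ofList_pairwise_lt cuts_a
  have hpb : sb.Pairwise (· < ·) := PySem.List.sorted_ofList_pairwise_lt cuts_b
  have hpm : (pvMergeUniq sa sb).Pairwise (· < ·) := pairwise_pvMergeUniq sa sb hpa hpb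
  apply PySem.List.sorted_eq_of_perm_of_pairwise_lt
  · -- permutation: both Nodup with equal membership
    apply (List.perm_ext_iff_of_nodup (hpm.imp ne_of_lt) ?_).mpr
    · intro z
      rw [mem_pvMergeUniq]
      simp only [hsa, hsb, PySem.List.mem_sorted, PySem.Set.mem_ofList,
        PySem.Set.mem_union]
    · exact PySem.Set.nodup_union _ _ (PySem.Set.nodup_ofList cuts_a)
  · exact hpm

-- the two proximity passes agree: A reads deduped[-1], B carries the last kept value
theorem pvProx_eq (proximity : Int) (rest : List Int) :
    ∀ (init : List Int) (h : init ≠ []) (last : Int), last = init.getLast h →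
    rest.foldl (fun deduped c =>
        if proximity ≤ c - PySem.List.pyGetD deduped (-1) 0 then deduped ++ [c] else deduped) init
      = (rest.foldl (fun (s : List Int × Int) c =>
          if proximity ≤ c - s.2 then (s.1 ++ [c], c) else s) (init, last)).1 := by
  induction rest with
  | nil => intro init h last hl; simp
  | cons c rest ih =>
    intro init h last hl
    simp only [List.foldl_cons]
    rw [PySem.List.pyGetD_neg_one init 0 h, ← hl]
    by_cases hc : proximity ≤ c - last
    · simp only [if_pos hc]
      exact ih (init ++ [c]) (by simp) c (by simp)
    · simp only [if_neg hc]
      exact ih init h last hl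

-- ===== VERDICT (by name: the statement is the Claim_ definition above) =====
theorem merge_cut_lists_py_spec : Claim_equal_merge_cut_lists_py := by
  intro cuts_a cuts_b proximity _
  unfold Spec_merge_cut_lists_py merge_cut_lists_py merge_cut_lists_py_alt
  simp only []
  rw [pvMerged_eq cuts_a cuts_b]
  cases hm : pvMergeUniq (PySem.List.sorted (PySem.Set.ofList cuts_a) (fun x => x) false)
      (PySem.List.sorted (PySem.Set.ofList cuts_b) (fun x => x) false) with
  | nil => simp
  | cons m rest =>
    rw [dif_neg (by simp)]
    rw [PySem.List.slice_from_one]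
    simpa using pvProx_eq proximity rest [m] (by simp) m (by simp)
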